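-- pv_equiv track=rewrite | github.com/wilmurillo-ai/Design-Assistant | .skills/openclaw-skills/skills/xx235300/mermaid-canvas/scripts/mermaid_render.py | validate_mermaid_code
-- ===== SOURCE A (Python) =====
-- def validate_mermaid_code(mermaid_code: str) -> tuple[bool, str]:
--     """
--     验证 Mermaid 代码语法
--
--     Args:
--         mermaid_code: Mermaid 图表代码
--
--     Returns:
--         (是否有效, 错误信息)
--     """
--     # 基本检查
--     if not mermaid_code or not mermaid_code.strip():
--         return False, "Mermaid 代码为空"
--
--     code = mermaid_code.strip()
--
--     # 检查是否包含图表类型声明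
--     valid_types = [
--         'flowchart', 'graph', 'sequenceDiagram', 'classDiagram',
--         'stateDiagram', 'erDiagram', 'gantt', 'pie', 'mindmap',
--         'timeline', 'journey', 'architecture', 'gitGraph',
--         'quadrantChart', 'xyChart', 'requirementDiagram', 'c4Diagram',
--         'radar', 'sankey', 'block', 'ishikawa', 'venn', 'treemap',
--         'wardley', 'eventmodeling', 'kanban', 'packet', 'treeView'
--     ]
--
--     has_valid_type = any(code.startswith(t) or f'\n{t}' in code or f' {t}' in code
--                          for t in valid_types)
--
--     if not has_valid_type:
--         return False, "未识别图表类型，请确保代码以有效的 Mermaid 关键字开头"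
--
--     return True, ""
-- ===== SOURCE B (Python) =====
-- def validate_mermaid_code(mermaid_code: str) -> tuple[bool, str]:
--     if not mermaid_code or not mermaid_code.strip():
--         return False, "Mermaid 代码为空"
--
--     code = mermaid_code.strip()
--
--     valid_types = (
--         'flowchart', 'graph', 'sequenceDiagram', 'classDiagram',
--         'stateDiagram', 'erDiagram', 'gantt', 'pie', 'mindmap',
--         'timeline', 'journey', 'architecture', 'gitGraph',
--         'quadrantChart', 'xyChart', 'requirementDiagram', 'c4Diagram',
--         'radar', 'sankey', 'block', 'ishikawa', 'venn', 'treemap',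
--         'wardley', 'eventmodeling', 'kanban', 'packet', 'treeView'
--     )
--
--     # candidate start positions: the beginning, and the character after every
--     # space / newline (exactly the two separators A's substring tests probe)
--     positions = [0] + [i + 1 for i, ch in enumerate(code) if ch == ' ' or ch == '\n']
--
--     has_valid_type = any(code.startswith(valid_types, p) for p in positions)
--
--     if not has_valid_type:
--         return False, "未识别图表类型，请确保代码以有效的 Mermaid 关键字开头"
--
--     return True, ""
-- ===== Notes on version B (the rewrite author's own statement) =====
-- stated objective: alternative
-- what changed: Instead of testing, for each diagram type, prefix plus two substring containments ('\n'+t in code, ' '+t in code), B computes once the list of candidate start positions (0 and every index after a space or newline) and asks str.startswith with the tuple of types at each position.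
import Mathlib
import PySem

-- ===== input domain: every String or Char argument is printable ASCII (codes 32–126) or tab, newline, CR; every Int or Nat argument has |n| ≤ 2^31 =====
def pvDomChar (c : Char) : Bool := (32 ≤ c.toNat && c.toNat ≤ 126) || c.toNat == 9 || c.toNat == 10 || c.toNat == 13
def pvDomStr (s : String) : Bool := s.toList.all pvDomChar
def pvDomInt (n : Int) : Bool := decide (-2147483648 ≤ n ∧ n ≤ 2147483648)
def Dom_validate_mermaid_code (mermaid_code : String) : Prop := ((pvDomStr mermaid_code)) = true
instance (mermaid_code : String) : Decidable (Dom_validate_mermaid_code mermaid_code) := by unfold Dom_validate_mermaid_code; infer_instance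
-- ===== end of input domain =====

-- B replaces A's per-type (prefix ∨ "\n"+t-substring ∨ " "+t-substring) tests by one pass
-- collecting candidate start positions (0 and each index after ' '/'\n') and prefix tests there.


-- ===== PORT A =====
-- the valid_types list (shared literal data of both programs)
def pvValidTypes : List String :=
  ["flowchart", "graph", "sequenceDiagram", "classDiagram",
   "stateDiagram", "erDiagram", "gantt", "pie", "mindmap",
   "timeline", "journey", "architecture", "gitGraph",
   "quadrantChart", "xyChart", "requirementDiagram", "c4Diagram",
   "radar", "sankey", "block", "ishikawa", "venn", "treemap",
   "wardley", "eventmodeling", "kanban", "packet", "treeView"]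

def validate_mermaid_code (mermaid_code : String) : Bool × String :=
  if mermaid_code = "" || PySem.Str.strip mermaid_code = "" then
    (false, "Mermaid 代码为空")
  else
    let code := PySem.Str.strip mermaid_code
    -- any(code.startswith(t) or f'\n{t}' in code or f' {t}' in code for t in valid_types)
    let has_valid_type := pvValidTypes.any (fun t =>
      PySem.Chars.startswith code.toList t.toList ||
      PySem.Chars.isIn ('\n' :: t.toList) code.toList ||
      PySem.Chars.isIn (' ' :: t.toList) code.toList)
    if !has_valid_type then
      (false, "未识别图表类型，请确保代码以有效的 Mermaid 关键字开头")
    else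
      (true, "")

-- ===== PORT B =====
-- code.startswith(t, p) for 0 ≤ p ≤ len(code): exact — Python tests t against code[p:]
def pvStartsAt (cs t : List Char) (p : Int) : Bool :=
  PySem.Chars.startswith (cs.drop p.toNat) t

def validate_mermaid_code_alt (mermaid_code : String) : Bool × String :=
  if mermaid_code = "" || PySem.Str.strip mermaid_code = "" then
    (false, "Mermaid 代码为空")
  else
    let cs := (PySem.Str.strip mermaid_code).toList
    -- positions = [0] + [i + 1 for i, ch in enumerate(code) if ch == ' ' or ch == '\n']
    let positions : List Int :=
      (0 : Int) :: ((PySem.List.enumerate cs 0).filter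
        (fun q => q.2 == ' ' || q.2 == '\n')).map (fun q => q.1 + 1)
    -- any(code.startswith(valid_types, p) for p in positions)
    let has_valid_type := positions.any (fun p => pvValidTypes.any (fun t => pvStartsAt cs t.toList p))
    if !has_valid_type then
      (false, "未识别图表类型，请确保代码以有效的 Mermaid 关键字开头")
    else
      (true, "")

-- ===== PRECONDITION & SPEC =====
def Spec_validate_mermaid_code (mermaid_code : String) (out : Bool × String) : Prop := out = validate_mermaid_code_alt mermaid_code
instance (mermaid_code : String) (out : Bool × String) : Decidable (Spec_validate_mermaid_code mermaid_code out) := by unfold Spec_validate_mermaid_code; infer_instance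

-- ===== CLAIM (what is proved, stated in full; the proofs are below) =====
def Claim_equal_validate_mermaid_code : Prop := ∀ (mermaid_code : String), Dom_validate_mermaid_code mermaid_code → Spec_validate_mermaid_code mermaid_code (validate_mermaid_code mermaid_code)

-- ===== LEMMAS AND PROOFS =====

-- '\n'+t (resp. ' '+t) occurs in cs iff some position i holds the separator and t starts at i+1
theorem pv_infix_cons_iff (c : Char) (t cs : List Char) :
    (c :: t) <:+: cs ↔ ∃ (i : Nat), ∃ (h : i < cs.length), cs[i] = c ∧ t <+: cs.drop (i + 1) := by
  rw [← PySem.Chars.isIn_iff_infix, ← PySem.Chars.exists_prefix_drop_iff_isIn]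
  constructor
  · rintro ⟨j, hj⟩
    have hjlt : j < cs.length := by
      by_contra h
      rw [List.drop_eq_nil_of_le (by omega)] at hj
      exact (List.cons_ne_nil c t) (List.prefix_nil.mp hj)
    rw [List.drop_eq_getElem_cons hjlt, List.cons_prefix_cons] at hj
    exact ⟨j, hjlt, hj.1.symm, hj.2⟩
  · rintro ⟨i, h, hc, ht⟩
    refine ⟨i, ?_⟩
    rw [List.drop_eq_getElem_cons h, List.cons_prefix_cons]
    exact ⟨hc.symm, ht⟩

-- per-type bridge: A's three tests for t ⟺ t starts at some candidate position of B
theorem pv_perType (cs : List Char) (t : List Char) :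
    (PySem.Chars.startswith cs t ||
     PySem.Chars.isIn ('\n' :: t) cs ||
     PySem.Chars.isIn (' ' :: t) cs) = true ↔
    ∃ p ∈ ((0 : Int) :: ((PySem.List.enumerate cs 0).filter
        (fun q => q.2 == ' ' || q.2 == '\n')).map (fun q => q.1 + 1)),
      pvStartsAt cs t p = true := by
  simp only [Bool.or_eq_true, PySem.Chars.startswith_iff, PySem.Chars.isIn_iff_infix,
    pv_infix_cons_iff, List.mem_cons, List.mem_map, List.mem_filter,
    PySem.List.mem_enumerate_iff, pvStartsAt]
  constructor
  · rintro ((h | ⟨i, hi, hc, ht⟩) | ⟨i, hi, hc, ht⟩)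
    · exact ⟨0, Or.inl rfl, by simpa using h⟩
    · refine ⟨(i : Int) + 1, Or.inr ⟨(i, '\n'), ⟨⟨i, hi, by simp [hc]⟩, by simp⟩, rfl⟩, ?_⟩
      simpa using ht
    · refine ⟨(i : Int) + 1, Or.inr ⟨(i, ' '), ⟨⟨i, hi, by simp [hc]⟩, by simp⟩, rfl⟩, ?_⟩
      simpa using ht
  · rintro ⟨p, (rfl | ⟨⟨j, c⟩, ⟨⟨k, hk, hq⟩, hsep⟩, rfl⟩), hp⟩
    · exact Or.inl (Or.inl (by simpa using hp))
    · have hj : (j : Int) = (0 : Int) + (k : Int) := (Prod.ext_iff.mp hq).1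
      have hc : c = cs[k] := (Prod.ext_iff.mp hq).2
      have htoNat : (j + 1).toNat = k + 1 := by omega
      rw [htoNat] at hp
      rcases hsep with h | h
      · have h' : c = ' ' := by simpa using h
        exact Or.inr ⟨k, hk, by rw [← hc, h'], hp⟩
      · have h' : c = '\n' := by simpa using h
        exact Or.inl (Or.inr ⟨k, hk, by rw [← hc, h'], hp⟩)

-- the two any-expressions agree (swap the order of the two existentials)
theorem pv_any_eq (cs : List Char) :
    pvValidTypes.any (fun t =>
      PySem.Chars.startswith cs t.toList ||
      PySem.Chars.isIn ('\n' :: t.toList) cs ||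
      PySem.Chars.isIn (' ' :: t.toList) cs) =
    ((0 : Int) :: ((PySem.List.enumerate cs 0).filter
        (fun q => q.2 == ' ' || q.2 == '\n')).map (fun q => q.1 + 1)).any
      (fun p => pvValidTypes.any (fun t => pvStartsAt cs t.toList p)) := by
  rw [Bool.eq_iff_iff]
  simp only [List.any_eq_true]
  constructor
  · rintro ⟨t, htmem, ht⟩
    obtain ⟨p, hpmem, hp⟩ := (pv_perType cs t.toList).mp ht
    exact ⟨p, hpmem, t, htmem, hp⟩
  · rintro ⟨p, hpmem, t, htmem, hp⟩
    exact ⟨t, htmem, (pv_perType cs t.toList).mpr ⟨p, hpmem, hp⟩⟩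

-- ===== VERDICT (by name: the statement is the Claim_ definition above) =====
theorem validate_mermaid_code_spec : Claim_equal_validate_mermaid_code := by
  intro s _
  unfold Spec_validate_mermaid_code validate_mermaid_code validate_mermaid_code_alt
  split
  · rfl
  · simp only [pv_any_eq]
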